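-- pv_equiv track=rewrite | github.com/duhby/hypixel.py | hypixel/utils.py | uhc_level
-- ===== SOURCE A (Python) =====
-- xps = [0, 10, 60, 210, 460, 960, 1710, 2710, 5210, 10210, 13210, 16210,
--        19210, 22210, 25210]
--
-- def uhc_level(exp):
--     level = 0
--     for xp in xps:
--         if exp >= xp:
--             level += 1
--         else:
--             break
--     return level
-- ===== SOURCE B (Python) =====
-- import bisect
--
-- xps = [0, 10, 60, 210, 460, 960, 1710, 2710, 5210, 10210, 13210, 16210,
--        19210, 22210, 25210]
--
-- def uhc_level(exp):
--     return bisect.bisect_right(xps, exp)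
-- ===== Notes on version B (the rewrite author's own statement) =====
-- stated objective: idiomatic
-- what changed: Replaced the linear scan-with-break over the sorted thresholds by bisect.bisect_right, a binary search returning the count of thresholds <= exp.
import Mathlib
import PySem

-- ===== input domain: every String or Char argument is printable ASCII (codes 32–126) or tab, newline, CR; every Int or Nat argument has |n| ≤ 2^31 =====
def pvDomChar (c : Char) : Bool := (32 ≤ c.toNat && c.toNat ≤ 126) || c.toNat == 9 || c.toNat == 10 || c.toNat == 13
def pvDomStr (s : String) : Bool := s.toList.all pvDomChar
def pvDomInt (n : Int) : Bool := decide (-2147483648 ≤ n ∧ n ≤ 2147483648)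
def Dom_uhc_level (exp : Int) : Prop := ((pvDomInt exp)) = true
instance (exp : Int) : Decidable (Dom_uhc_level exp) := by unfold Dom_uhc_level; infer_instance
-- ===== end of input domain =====

-- B replaces A's linear scan-with-break over the sorted thresholds by a binary search (bisect_right).

-- ===== PORT A =====
-- the module-level constant xps
def xpsList : List Int := [0, 10, 60, 210, 460, 960, 1710, 2710, 5210, 10210, 13210, 16210, 19210, 22210, 25210]

-- the for-loop with break: recurse over xps, incrementing level, stopping at the first xp > exp
def uhcLoopA (exp : Int) : List Int → Int → Int
  | [], level => level
  | xp :: rest, level => if exp ≥ xp then uhcLoopA exp rest (level + 1) else level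

def uhc_level (exp : Int) : Int := uhcLoopA exp xpsList 0

-- ===== PORT B =====
-- bisect.bisect_right(a, x): lo=0, hi=len(a); while lo<hi: mid=(lo+hi)//2; if x < a[mid]: hi=mid else lo=mid+1; return lo
-- the fuel argument only bounds the while-loop (hi-lo shrinks every turn, so fuel = len suffices); it never alters the result
def bisectGo (a : List Int) (x : Int) : Nat → Nat → Nat → Nat
  | 0, lo, _ => lo
  | fuel + 1, lo, hi =>
    if lo < hi then
      let mid := (lo + hi) / 2
      if x < a.getD mid 0 then bisectGo a x fuel lo mid else bisectGo a x fuel (mid + 1) hi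
    else lo

def bisectRight (a : List Int) (x : Int) : Nat := bisectGo a x a.length 0 a.length

def uhc_level_alt (exp : Int) : Int := (bisectRight xpsList exp : Int)

-- ===== PRECONDITION & SPEC =====
def Spec_uhc_level (exp : Int) (out : Int) : Prop := out = uhc_level_alt exp
instance (exp : Int) (out : Int) : Decidable (Spec_uhc_level exp out) := by unfold Spec_uhc_level; infer_instance

-- ===== CLAIM (what is proved, stated in full; the proofs are below) =====
def Claim_equal_uhc_level : Prop := ∀ (exp : Int), Dom_uhc_level exp → Spec_uhc_level exp (uhc_level exp)

-- ===== LEMMAS AND PROOFS =====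

-- xps is sorted (pointwise on getD indices below its length)
theorem xps_sorted : ∀ j, j < 15 → ∀ i, i ≤ j → xpsList.getD i 0 ≤ xpsList.getD j 0 := by decide

-- both results are characterised by the same predicate: n counts exactly the thresholds ≤ x
def GoodCount (x : Int) (n : Nat) : Prop :=
  n ≤ 15 ∧ ∀ i, i < 15 → (i < n ↔ xpsList.getD i 0 ≤ x)

theorem good_unique {x : Int} {m n : Nat} (hm : GoodCount x m) (hn : GoodCount x n) : m = n := by
  rcases hm with ⟨hm1, hm2⟩
  rcases hn with ⟨hn1, hn2⟩
  by_contra hne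
  rcases Nat.lt_or_ge m n with h | h
  · have hmlt : m < 15 := lt_of_lt_of_le h hn1
    have := (hn2 m hmlt).mp h
    have := (hm2 m hmlt).mpr this
    omega
  · have h' : n < m := by omega
    have hnlt : n < 15 := lt_of_lt_of_le h' hm1
    have := (hm2 n hnlt).mp h'
    have := (hn2 n hnlt).mpr this
    omega

-- the loop with break computes acc + length of the longest prefix of thresholds ≤ x
theorem loopA_eq (x : Int) : ∀ (l : List Int) (acc : Int),
    uhcLoopA x l acc = acc + ((l.takeWhile (fun xp => decide (x ≥ xp))).length : Int) := by
  intro l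
  induction l with
  | nil => intro acc; simp [uhcLoopA]
  | cons y t ih =>
    intro acc
    by_cases h : x ≥ y
    · simp [uhcLoopA, h, List.takeWhile, ih]
      push_cast
      ring
    · simp [uhcLoopA, h, List.takeWhile]

-- the takeWhile-prefix length is Good, for any sorted list (stated generically, applied to xpsList)
theorem tw_good_gen (x : Int) : ∀ (l : List Int),
    (∀ j, j < l.length → ∀ i, i ≤ j → l.getD i 0 ≤ l.getD j 0) →
    (l.takeWhile (fun xp => decide (x ≥ xp))).length ≤ l.length ∧
      ∀ i, i < l.length → (i < (l.takeWhile (fun xp => decide (x ≥ xp))).length ↔ l.getD i 0 ≤ x) := by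
  intro l
  induction l with
  | nil => intro _; simp
  | cons y t ih =>
    intro hsort
    have hsort' : ∀ j, j < t.length → ∀ i, i ≤ j → t.getD i 0 ≤ t.getD j 0 := by
      intro j hj i hij
      have := hsort (j + 1) (by simpa using Nat.succ_lt_succ hj) (i + 1) (by omega)
      simpa [List.getD_cons_succ] using this
    rcases ih hsort' with ⟨ih1, ih2⟩
    by_cases h : x ≥ y
    · have htw : (y :: t).takeWhile (fun xp => decide (x ≥ xp))
          = y :: t.takeWhile (fun xp => decide (x ≥ xp)) := by
        rw [List.takeWhile_cons]
        simp [h]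
      rw [htw]
      refine ⟨by simpa using Nat.succ_le_succ ih1, ?_⟩
      intro i hi
      cases i with
      | zero =>
        rw [List.getD_cons_zero]
        exact iff_of_true (by simp) h
      | succ i =>
        rw [List.getD_cons_succ, List.length_cons, Nat.succ_lt_succ_iff]
        exact ih2 i (by simpa using Nat.lt_of_succ_lt_succ hi)
    · have htw : (y :: t).takeWhile (fun xp => decide (x ≥ xp)) = [] := by
        rw [List.takeWhile_cons]
        simp [h]
      rw [htw]
      refine ⟨by simp, ?_⟩
      intro i hi
      simp only [List.length_nil]
      cases i with
      | zero =>
        rw [List.getD_cons_zero]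
        exact iff_of_false (by omega) (by omega)
      | succ i =>
        have h0 : (y :: t).getD 0 0 ≤ (y :: t).getD (i + 1) 0 := hsort (i + 1) hi 0 (by omega)
        rw [List.getD_cons_zero] at h0
        rw [List.getD_cons_succ] at h0 ⊢
        exact iff_of_false (by omega) (by omega)

theorem tw_good (x : Int) : GoodCount x ((xpsList.takeWhile (fun xp => decide (x ≥ xp))).length) := by
  have := tw_good_gen x xpsList (by intro j hj i hij; exact xps_sorted j (by simpa [xpsList] using hj) i hij)
  simpa [GoodCount, xpsList] using this

-- binary-search invariant: with everything left of lo known ≤ x and everything right of hi known > x,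
-- bisectGo lands on the Good count
theorem bisectGo_good (x : Int) : ∀ (fuel lo hi : Nat),
    hi - lo ≤ fuel → lo ≤ hi → hi ≤ 15 →
    (∀ i, i < lo → xpsList.getD i 0 ≤ x) →
    (∀ i, hi ≤ i → i < 15 → x < xpsList.getD i 0) →
    GoodCount x (bisectGo xpsList x fuel lo hi) := by
  intro fuel
  induction fuel with
  | zero =>
    intro lo hi hfuel hle hhi hlo hhi'
    have : lo = hi := by omega
    subst this
    refine ⟨by simpa [bisectGo] using hhi, ?_⟩
    intro i hi15
    simp only [bisectGo]
    constructor
    · exact fun h => hlo i h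
    · intro h
      by_contra hni
      exact absurd h (not_le.mpr (hhi' i (by omega) hi15))
  | succ fuel ih =>
    intro lo hi hfuel hle hhi hlo hhi'
    simp only [bisectGo]
    by_cases hlt : lo < hi
    · simp only [hlt, if_true]
      set mid := (lo + hi) / 2 with hmid
      have hmlo : lo ≤ mid := by omega
      have hmhi : mid < hi := by omega
      by_cases hx : x < xpsList.getD mid 0
      · simp only [hx, if_true]
        apply ih lo mid (by omega) hmlo (by omega) hlo
        intro i hi1 hi2
        exact lt_of_lt_of_le hx (xps_sorted i hi2 mid hi1)
      · simp only [hx, if_false]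
        apply ih (mid + 1) hi (by omega) (by omega) hhi
        · intro i hi1
          rcases Nat.lt_or_ge i lo with h | h
          · exact hlo i h
          · exact le_trans (xps_sorted mid (by omega) i (by omega)) (not_lt.mp hx)
        · exact hhi'
    · simp only [hlt, if_false]
      have : lo = hi := by omega
      subst this
      refine ⟨hhi, ?_⟩
      intro i hi15
      constructor
      · exact fun h => hlo i h
      · intro h
        by_contra hni
        exact absurd h (not_le.mpr (hhi' i (by omega) hi15))

theorem bisect_good (x : Int) : GoodCount x (bisectRight xpsList x) := by
  have h : xpsList.length = 15 := by decide
  unfold bisectRight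
  rw [h]
  exact bisectGo_good x 15 0 15 (by omega) (by omega) (by omega)
    (by intro i hi; omega) (by intro i hi1 hi2; omega)

-- ===== VERDICT (by name: the statement is the Claim_ definition above) =====
theorem uhc_level_spec : Claim_equal_uhc_level := by
  intro exp _
  unfold Spec_uhc_level uhc_level uhc_level_alt
  rw [loopA_eq]
  have := good_unique (tw_good exp) (bisect_good exp)
  omega
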